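-- pv_equiv track=rewrite | github.com/bigface008/leetcode_py | companies/meituan/fall24/p2.py | solution
-- ===== SOURCE A (Python) =====
-- from typing import List
--
-- def solution(N: int, K: int, X: int, arr: List[int]) -> int:
--     seen = set()
--     mex = [0] * N
--     mex_val = 0
--     for i in range(N - 1, -1, -1):
--         x = arr[i]
--         seen.add(x)
--         while mex_val in seen:
--             mex_val += 1
--         mex[i] = mex_val
--
--     dp = [0] * (N + 1)
--     for i in range(N, -1, -1):
--         if i == N:
--             dp[i] = 0
--             continue
--         plan1 = X + dp[i + 1]
--         plan2 = K * mex[i]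
--         dp[i] = min(plan1, plan2)
--
--     return dp[0]
-- ===== SOURCE B (Python) =====
-- def solution(N, K, X, arr):
--     # One fused pass over the reversed prefix: walk the suffix values directly
--     # (no index arithmetic into arr, no mex/dp arrays), maintaining the suffix
--     # mex incrementally and folding a running minimum; dp[0] equals
--     # min(N*X, min_i (i*X + K*mex_i)) because the K*mex_i option terminates.
--     ans = N * X
--     seen = set()
--     mex = 0
--     idx = N - 1
--     for v in reversed(arr[:N]):
--         seen.add(v)
--         while mex in seen:
--             mex += 1
--         ans = min(ans, idx * X + K * mex)
--         idx -= 1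
--     return ans
-- ===== Notes on version B (the rewrite author's own statement) =====
-- stated objective: simpler
-- what changed: B replaces A's two staged passes (build a mex array backwards, then a backward dp array) with one fused forward walk over the reversed prefix reversed(arr[:N]) that folds ans = min(ans, idx*X + K*mex) from the baseline N*X, using dp[0] = min(N*X, min_i(i*X + K*mex_i)); no mex or dp arrays and no indexed access to arr.
import Mathlib
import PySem

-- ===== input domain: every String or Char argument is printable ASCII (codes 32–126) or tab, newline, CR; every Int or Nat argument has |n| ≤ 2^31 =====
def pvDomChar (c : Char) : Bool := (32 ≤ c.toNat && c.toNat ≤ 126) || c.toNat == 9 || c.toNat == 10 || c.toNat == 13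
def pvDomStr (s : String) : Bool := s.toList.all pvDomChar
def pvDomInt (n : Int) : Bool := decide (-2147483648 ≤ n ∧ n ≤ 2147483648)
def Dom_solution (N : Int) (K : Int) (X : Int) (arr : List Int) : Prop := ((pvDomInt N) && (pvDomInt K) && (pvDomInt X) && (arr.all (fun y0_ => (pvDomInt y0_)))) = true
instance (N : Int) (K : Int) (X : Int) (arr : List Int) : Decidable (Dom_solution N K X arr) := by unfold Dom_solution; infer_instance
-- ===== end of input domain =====

-- B fuses everything into one walk over reversed(arr[:N]) folding a running minimum
-- (dp[0] = min(N*X, min_i (i*X + K*mex_i))), dropping A's mex and dp arrays and its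
-- second backward pass: simpler, one loop, no indexed access.

-- ===== PORT A =====
-- A's 'while mex_val in seen: mex_val += 1', fuelled; seen.length + 1 tests suffice.
def mexBumpAux (seen : PySem.Set Int) (v : Int) : Nat → Int
  | 0 => v
  | f + 1 => if PySem.Set.contains seen v then mexBumpAux seen (v + 1) f else v

def mexBump (seen : PySem.Set Int) (v : Int) : Int := mexBumpAux seen v (seen.length + 1)

def solution (N : Int) (K : Int) (X : Int) (arr : List Int) : Int :=
  let s1 : PySem.Set Int × Int × List Int :=
    (PySem.List.pyRange (N - 1) (-1) (-1)).foldl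
      (fun st i =>
        (PySem.Set.add st.1 ((PySem.List.pyGet? arr i).getD 0),
         mexBump (PySem.Set.add st.1 ((PySem.List.pyGet? arr i).getD 0)) st.2.1,
         PySem.List.pySetD st.2.2 i
           (mexBump (PySem.Set.add st.1 ((PySem.List.pyGet? arr i).getD 0)) st.2.1)))
      (PySem.Set.empty, 0, List.replicate N.toNat 0)
  let mex := s1.2.2
  let dp :=
    (PySem.List.pyRange N (-1) (-1)).foldl
      (fun dp i =>
        if i = N then PySem.List.pySetD dp i 0
        else PySem.List.pySetD dp i
          (min (X + PySem.List.pyGetD dp (i + 1) 0) (K * PySem.List.pyGetD mex i 0)))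
      (List.replicate (N + 1).toNat 0)
  PySem.List.pyGetD dp 0 0

-- ===== PORT B =====
-- B's 'while mex in seen: mex += 1', fuelled (fuel first, tail-recursive spelling).
def bumpB (seen : PySem.Set Int) : Nat → Int → Int
  | 0, v => v
  | f + 1, v => if PySem.Set.contains seen v then bumpB seen f (v + 1) else v

-- the body of B's single for-loop, as structural recursion over the value list
def altGo (K X : Int) (seen : PySem.Set Int) (mex idx ans : Int) : List Int → Int
  | [] => ans
  | v :: rest =>
      let seen' := PySem.Set.add seen v
      let mex' := bumpB seen' (seen'.length + 1) mex
      altGo K X seen' mex' (idx - 1) (min ans (idx * X + K * mex')) rest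

def solution_alt (N : Int) (K : Int) (X : Int) (arr : List Int) : Int :=
  altGo K X PySem.Set.empty 0 (N - 1) (N * X)
    ((PySem.List.slice arr none (some N)).reverse)

-- ===== PRECONDITION & SPEC =====
-- A raises IndexError when N < 0 (dp[0] on an empty list) and when N > len(arr) (arr[i]); Pre_ is exactly where A returns.
def Pre_solution (N : Int) (K : Int) (X : Int) (arr : List Int) : Prop := 0 ≤ N ∧ N ≤ arr.length
instance (N : Int) (K : Int) (X : Int) (arr : List Int) : Decidable (Pre_solution N K X arr) := by unfold Pre_solution; infer_instance

def pvWitness_solution : Int × Int × Int × List Int := (3, 2, 5, [0, 2, 1])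

def Spec_solution (N : Int) (K : Int) (X : Int) (arr : List Int) (out : Int) : Prop := out = solution_alt N K X arr
instance (N : Int) (K : Int) (X : Int) (arr : List Int) (out : Int) : Decidable (Spec_solution N K X arr out) := by unfold Spec_solution; infer_instance

-- ===== CLAIM (what is proved, stated in full; the proofs are below) =====
def Claim_equal_solution : Prop := ∀ (N : Int) (K : Int) (X : Int) (arr : List Int), Dom_solution N K X arr → Pre_solution N K X arr → Spec_solution N K X arr (solution N K X arr)

-- ===== LEMMAS AND PROOFS =====

-- [n-1, n-2, ..., 0], the order of A's backward loops
def descList : Nat → List Int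
  | 0 => []
  | m + 1 => (m : Int) :: descList m

-- the sequence of (index, mex value) pairs produced by A's backward suffix-mex pass
def mexSeq (arr : List Int) : List Int → PySem.Set Int → Int → List (Int × Int)
  | [], _, _ => []
  | i :: L, seen, v =>
    ((i, mexBump (PySem.Set.add seen ((PySem.List.pyGet? arr i).getD 0)) v) ::
      mexSeq arr L (PySem.Set.add seen ((PySem.List.pyGet? arr i).getD 0))
        (mexBump (PySem.Set.add seen ((PySem.List.pyGet? arr i).getD 0)) v))

-- A's dp values, indexed by distance k from N: dpE … k = dp[n-k]
def dpE (K X : Int) (mexl : List Int) (n : Nat) : Nat → Int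
  | 0 => 0
  | k + 1 => min (X + dpE K X mexl n k) (K * PySem.List.pyGetD mexl ((n : Int) - (k : Int) - 1) 0)

theorem descOf (m : Nat) : PySem.List.pyRange ((m : Int) - 1) (-1) (-1) = descList m := by
  induction m with
  | zero => exact PySem.List.pyRange_neg_one_eq_nil (by norm_num)
  | succ m ih =>
    rw [PySem.List.pyRange_neg_one_cons (by push_cast; omega)]
    have h1 : ((m + 1 : Nat) : Int) - 1 = (m : Int) := by push_cast; ring
    rw [h1, ih]; rfl

theorem mem_descList {i : Int} {m : Nat} (h : i ∈ descList m) : 0 ≤ i ∧ i < m := by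
  induction m with
  | zero => simp [descList] at h
  | succ m ih =>
    simp only [descList, List.mem_cons] at h
    rcases h with rfl | h
    · exact ⟨Int.natCast_nonneg m, by push_cast; omega⟩
    · have := ih h; push_cast; omega

theorem nodup_descList (m : Nat) : (descList m).Nodup := by
  induction m with
  | zero => simp [descList]
  | succ m ih =>
    simp only [descList, List.nodup_cons]
    exact ⟨fun h => by have := mem_descList h; omega, ih⟩

theorem foldA (arr : List Int) (L : List Int) :
    ∀ (seen : PySem.Set Int) (v : Int) (mex : List Int),
    (L.foldl
      (fun (st : PySem.Set Int × Int × List Int) i =>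
        (PySem.Set.add st.1 ((PySem.List.pyGet? arr i).getD 0),
         mexBump (PySem.Set.add st.1 ((PySem.List.pyGet? arr i).getD 0)) st.2.1,
         PySem.List.pySetD st.2.2 i
           (mexBump (PySem.Set.add st.1 ((PySem.List.pyGet? arr i).getD 0)) st.2.1)))
      (seen, v, mex)).2.2
    = (mexSeq arr L seen v).foldl (fun l p => PySem.List.pySetD l p.1 p.2) mex := by
  induction L with
  | nil => intro seen v mex; rfl
  | cons i L ih => intro seen v mex; simp only [List.foldl_cons, mexSeq]; exact ih _ _ _

theorem bumpB_eq (seen : PySem.Set Int) (f : Nat) : ∀ v, bumpB seen f v = mexBumpAux seen v f := by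
  induction f with
  | zero => intro v; rfl
  | succ f ih =>
    intro v
    simp only [bumpB, mexBumpAux]
    split <;> simp [ih]

-- B's single loop over the reversed prefix computes the same min-fold over A's pair sequence
theorem altGoSpec (arr : List Int) (K X : Int) :
    ∀ (n : Nat), n ≤ arr.length → ∀ (seen : PySem.Set Int) (v ans : Int),
    altGo K X seen v ((n : Int) - 1) ans ((arr.take n).reverse)
      = (mexSeq arr (descList n) seen v).foldl (fun a p => min a (p.1 * X + K * p.2)) ans := by
  intro n
  induction n with
  | zero => intro _ seen v ans; rfl
  | succ n ih =>
    intro hle seen v ans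
    have hlt : n < arr.length := by omega
    have htake : (arr.take (n + 1)).reverse = arr[n] :: (arr.take n).reverse := by
      rw [List.take_succ, List.getElem?_eq_getElem hlt]
      simp
    have hget : (PySem.List.pyGet? arr ((n : Nat) : Int)).getD 0 = arr[n] := by
      simp [PySem.List.pyGet?_natCast, List.getElem?_eq_getElem hlt]
    rw [htake]
    show altGo K X seen v (((n + 1 : Nat) : Int) - 1) ans (arr[n] :: (arr.take n).reverse) = _
    simp only [altGo, descList, mexSeq, List.foldl_cons, hget]
    have hidx : ((n + 1 : Nat) : Int) - 1 = ((n : Nat) : Int) := by push_cast; ring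
    rw [hidx, bumpB_eq]
    exact ih (by omega) _ _ _

theorem mexSeq_fst (arr : List Int) (L : List Int) :
    ∀ seen v, (mexSeq arr L seen v).map Prod.fst = L := by
  induction L with
  | nil => intro _ _; rfl
  | cons i L ih => intro seen v; simp only [mexSeq, List.map_cons, ih]

theorem setAll_length (pairs : List (Int × Int)) :
    ∀ l : List Int, (∀ p ∈ pairs, 0 ≤ p.1) →
    (pairs.foldl (fun l p => PySem.List.pySetD l p.1 p.2) l).length = l.length := by
  induction pairs with
  | nil => intro l _; rfl
  | cons q pairs ih =>
    intro l h
    simp only [List.foldl_cons]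
    rw [ih _ (fun p hp => h p (List.mem_cons_of_mem _ hp)),
        PySem.List.pySetD_of_nonneg _ _ (h q (List.mem_cons_self)), List.length_set]

theorem setAll_untouched (pairs : List (Int × Int)) :
    ∀ (l : List Int) (i : Int), (∀ p ∈ pairs, p.1 ≠ i) → (∀ p ∈ pairs, 0 ≤ p.1) → 0 ≤ i →
    PySem.List.pyGetD (pairs.foldl (fun l p => PySem.List.pySetD l p.1 p.2) l) i 0
      = PySem.List.pyGetD l i 0 := by
  induction pairs with
  | nil => intro l i _ _ _; rfl
  | cons q pairs ih =>
    intro l i hne h0 hi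
    simp only [List.foldl_cons]
    rw [ih _ _ (fun p hp => hne p (List.mem_cons_of_mem _ hp))
          (fun p hp => h0 p (List.mem_cons_of_mem _ hp)) hi,
        PySem.List.pySetD_of_nonneg _ _ (h0 q (List.mem_cons_self)),
        PySem.List.pyGetD_of_nonneg _ _ hi, PySem.List.pyGetD_of_nonneg _ _ hi]
    unfold List.getD
    rw [List.getElem?_set_ne]
    intro hEq
    have hq := h0 q List.mem_cons_self
    exact hne q List.mem_cons_self (by omega)

theorem setAll_lookup (pairs : List (Int × Int)) :
    ∀ (l : List Int) (i m : Int), (pairs.map Prod.fst).Nodup → (i, m) ∈ pairs →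
    (∀ p ∈ pairs, 0 ≤ p.1 ∧ p.1 < l.length) →
    PySem.List.pyGetD (pairs.foldl (fun l p => PySem.List.pySetD l p.1 p.2) l) i 0 = m := by
  induction pairs with
  | nil => intro l i m _ h _; simp at h
  | cons q pairs ih =>
    intro l i m hnd hmem hb
    simp only [List.map_cons, List.nodup_cons] at hnd
    simp only [List.foldl_cons]
    rcases List.mem_cons.mp hmem with rfl | hmem'
    · -- q = (i, m); later writes do not touch index i
      rw [setAll_untouched pairs _ i
            (fun p hp hpe => hnd.1 (hpe ▸ List.mem_map.mpr ⟨p, hp, rfl⟩))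
            (fun p hp => (hb p (List.mem_cons_of_mem _ hp)).1)
            (hb _ List.mem_cons_self).1]
      have h1 := (hb _ (List.mem_cons_self)).1
      have h2 := (hb _ (List.mem_cons_self)).2
      rw [PySem.List.pySetD_of_nonneg _ _ h1, PySem.List.pyGetD_of_nonneg _ _ h1]
      unfold List.getD
      rw [List.getElem?_set_self (by omega), Option.getD_some]
    · exact ih _ _ _ hnd.2 hmem'
        (fun p hp => by
          have := hb p (List.mem_cons_of_mem _ hp)
          rwa [PySem.List.pySetD_of_nonneg _ _ (hb q List.mem_cons_self).1, List.length_set])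

theorem dpLoop (K X : Int) (mexl : List Int) (n : Nat) :
    ∀ m k, m + k = n → ∀ dpl : List Int, dpl.length = n + 1 →
    PySem.List.pyGetD dpl (m : Int) 0 = dpE K X mexl n k →
    PySem.List.pyGetD
      ((descList m).foldl
        (fun dp i =>
          if i = (n : Int) then PySem.List.pySetD dp i 0
          else PySem.List.pySetD dp i
            (min (X + PySem.List.pyGetD dp (i + 1) 0) (K * PySem.List.pyGetD mexl i 0)))
        dpl) 0 0
      = dpE K X mexl n n := by
  intro m
  induction m with
  | zero =>
    intro k hk dpl _ hv
    simp only [descList, List.foldl_nil]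
    rw [show ((0:Nat):Int) = (0:Int) by norm_num] at hv
    rw [hv, show k = n by omega]
  | succ m ih =>
    intro k hk dpl hlen hv
    simp only [descList, List.foldl_cons]
    rw [if_neg (by push_cast; omega)]
    have hcast : ((m + 1 : Nat) : Int) = (m : Int) + 1 := by push_cast; ring
    rw [hcast] at hv
    have hidx : (n : Int) - (k : Int) - 1 = (m : Int) := by push_cast; omega
    have hval : min (X + PySem.List.pyGetD dpl ((m : Int) + 1) 0) (K * PySem.List.pyGetD mexl (m : Int) 0)
        = dpE K X mexl n (k + 1) := by
      rw [hv]; simp only [dpE]; rw [hidx]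
    apply ih (k + 1) (by omega)
    · rw [show ((m:Int)) = ((m:Nat):Int) by norm_num,
          PySem.List.pySetD_natCast, List.length_set, hlen]
    · rw [show ((m:Int)) = ((m:Nat):Int) by norm_num,
          PySem.List.pyGetD_pySetD_natCast _ _ _ _ _ (by omega), if_pos rfl, hval]

theorem minFold (K X : Int) (mexl : List Int) (n : Nat) :
    ∀ k t, k + t = n →
    (descList k).foldl (fun a i => min a (i * X + K * PySem.List.pyGetD mexl i 0))
      (dpE K X mexl n t + ((n : Int) - (t : Int)) * X)
    = dpE K X mexl n n := by
  intro k
  induction k with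
  | zero =>
    intro t ht
    simp only [descList, List.foldl_nil]
    rw [show t = n by omega]
    ring
  | succ k ih =>
    intro t ht
    simp only [descList, List.foldl_cons]
    have hidx : (n : Int) - (t : Int) - 1 = (k : Int) := by push_cast; omega
    have hstep : min (dpE K X mexl n t + ((n : Int) - (t : Int)) * X)
        ((k : Int) * X + K * PySem.List.pyGetD mexl (k : Int) 0)
        = dpE K X mexl n (t + 1) + ((n : Int) - ((t + 1 : Nat) : Int)) * X := by
      simp only [dpE]
      rw [hidx]
      have hC : (n : Int) - ((t + 1 : Nat) : Int) = (k : Int) := by push_cast; omega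
      rw [hC, ← min_add_add_right]
      congr 1
      · have h2 : (n : Int) - (t : Int) = (k : Int) + 1 := by push_cast; omega
        rw [h2]; ring
      · ring
    rw [hstep, ih (t + 1) (by omega)]

-- ===== VERDICT (by name: the statement is the Claim_ definition above) =====
theorem solution_spec : Claim_equal_solution := by
  intro N K X arr _ hPre
  obtain ⟨h0, hlen⟩ := hPre
  obtain ⟨n, rfl⟩ := Int.eq_ofNat_of_zero_le h0
  simp only [Spec_solution, solution, solution_alt]
  rw [descOf n]
  have hr2 : PySem.List.pyRange (n : Int) (-1) (-1) = descList (n + 1) := by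
    have h : ((n : Int)) = ((n + 1 : Nat) : Int) - 1 := by push_cast; ring
    rw [h, descOf]
  rw [hr2, Int.toNat_natCast, show ((n : Int) + 1).toNat = n + 1 by omega]
  rw [foldA]
  rw [PySem.List.slice_to_natCast, altGoSpec arr K X n (by exact_mod_cast hlen)]
  set pairs := mexSeq arr (descList n) PySem.Set.empty 0 with hpairs
  have hfst : pairs.map Prod.fst = descList n := mexSeq_fst arr (descList n) _ _
  have hbnd : ∀ p ∈ pairs, 0 ≤ p.1 ∧ p.1 < (n : Int) := by
    intro p hp
    exact mem_descList (hfst ▸ List.mem_map.mpr ⟨p, hp, rfl⟩)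
  set mexA := pairs.foldl (fun l p => PySem.List.pySetD l p.1 p.2) (List.replicate n 0) with hmexA
  have hmlen : mexA.length = n := by
    rw [hmexA, setAll_length _ _ (fun p hp => (hbnd p hp).1)]; simp
  -- A side: dp fold = dpE … n n
  rw [show descList (n + 1) = ((n : Int) :: descList n) from rfl, List.foldl_cons, if_pos rfl]
  rw [dpLoop K X mexA n n 0 (by omega) _
        (by rw [PySem.List.pySetD_natCast, List.length_set]; simp)
        (by rw [PySem.List.pySetD_natCast, PySem.List.pyGetD_natCast]
            simp [List.getD, dpE])]
  -- B side: min fold = dpE … n n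
  have hsub : ∀ (a : Int) (p : Int × Int), p ∈ pairs →
      min a (p.1 * X + K * p.2) = min a (p.1 * X + K * PySem.List.pyGetD mexA p.1 0) := by
    intro a p hp
    rw [setAll_lookup pairs _ p.1 p.2 (hfst ▸ nodup_descList n) (by simpa using hp)
          (fun q hq => by
            have hq' := hbnd q hq
            refine ⟨hq'.1, ?_⟩
            simpa using hq'.2)]
  rw [PySem.List.foldl_congr_mem pairs
        (fun (a : Int) (p : Int × Int) => min a (p.1 * X + K * p.2))
        (fun (a : Int) (p : Int × Int) => min a (p.1 * X + K * PySem.List.pyGetD mexA p.1 0))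
        ((n : Int) * X) hsub]
  rw [show (List.foldl (fun (a : Int) (p : Int × Int) => min a (p.1 * X + K * PySem.List.pyGetD mexA p.1 0)) ((n : Int) * X) pairs)
        = (List.foldl (fun (a i : Int) => min a (i * X + K * PySem.List.pyGetD mexA i 0)) ((n : Int) * X) (pairs.map Prod.fst))
      from (List.foldl_map (f := Prod.fst) (g := fun (a i : Int) => min a (i * X + K * PySem.List.pyGetD mexA i 0)) (l := pairs) (init := ((n : Int) * X))).symm]
  rw [hfst]
  rw [show ((n : Int) * X) = dpE K X mexA n 0 + ((n : Int) - ((0 : Nat) : Int)) * X by simp [dpE]]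
  exact (minFold K X mexA n n 0 (by omega)).symm
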